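-- pv_equiv track=rewrite | github.com/Nel10/holbertonschool-machine_learning | math/0x00-linear_algebra/7-gettin_cozy.py | equal_without
-- ===== SOURCE A (Python) =====
-- def equal_without(matrix1, matrix2, without=0, index=0):
--     """Returns true if the two matrices are equal without any index"""
--
--     if without != -1:
--         del matrix1[without]
--         del matrix2[without]
--         without = -1
--
--     if index >= len(matrix1):
--         return True
--
--     try:
--         if matrix1[index] != matrix2[index]:
--             return False
--     except IndexError:
--         return True
--
--     return equal_without(matrix1, matrix2, without, index + 1)
-- ===== SOURCE B (Python) =====
-- def equal_without(matrix1, matrix2, without=0, index=0):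
--     """Returns true if the two matrices are equal without any index"""
--     if without != -1:
--         del matrix1[without]
--         del matrix2[without]
--     for i in range(index, min(len(matrix1), len(matrix2))):
--         if matrix1[i] != matrix2[i]:
--             return False
--     return True
-- ===== Notes on version B (the rewrite author's own statement) =====
-- stated objective: simpler
-- what changed: Replaced A's try/except-driven self-recursion with a single iterative prefix-comparison loop bounded by min(len(matrix1), len(matrix2)), keeping the in-place deletion of both arguments.
-- outside the precondition, e.g. on equal_without([], [], -1, -3): A returns True, B raises IndexError; on equal_without([[1], [2]], [[1], [3]], 0, -3): A returns True, B raises IndexError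
import Mathlib
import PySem

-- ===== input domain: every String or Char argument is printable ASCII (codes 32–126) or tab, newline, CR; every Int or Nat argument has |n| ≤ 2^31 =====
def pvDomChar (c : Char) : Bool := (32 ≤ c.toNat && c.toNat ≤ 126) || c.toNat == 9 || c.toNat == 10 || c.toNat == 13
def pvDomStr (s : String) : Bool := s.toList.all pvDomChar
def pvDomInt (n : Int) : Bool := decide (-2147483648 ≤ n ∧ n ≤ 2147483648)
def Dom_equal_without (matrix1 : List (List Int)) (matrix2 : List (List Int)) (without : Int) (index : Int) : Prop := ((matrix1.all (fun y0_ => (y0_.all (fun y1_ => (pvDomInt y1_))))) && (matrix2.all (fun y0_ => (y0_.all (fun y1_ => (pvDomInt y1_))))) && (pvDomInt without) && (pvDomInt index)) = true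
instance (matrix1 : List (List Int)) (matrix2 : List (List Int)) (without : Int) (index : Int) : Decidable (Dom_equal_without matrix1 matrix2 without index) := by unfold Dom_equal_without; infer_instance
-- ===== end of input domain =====

-- B replaces A's try/except self-recursion by one min-length-bounded prefix loop (objective: simpler).
-- Both A and B delete row `without` from BOTH argument lists in place (identical mutation); equivalence here is about the return value.

-- ===== PORT A =====
-- literal transliteration of A: delete (del raising = none, outside Pre_), then recurse,
-- where a caught IndexError in the try block becomes the `| _, _ => true` match arm.
def equal_without (matrix1 : List (List Int)) (matrix2 : List (List Int)) (without : Int) (index : Int) : Bool :=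
  if without ≠ -1 then
    match PySem.List.pop? matrix1 without, PySem.List.pop? matrix2 without with
    | some (_, m1'), some (_, m2') => equal_without m1' m2' (-1) index
    | _, _ => false   -- IndexError from `del` (excluded by Pre_)
  else if (matrix1.length : Int) ≤ index then true
  else
    match PySem.List.pyGet? matrix1 index, PySem.List.pyGet? matrix2 index with
    | some a, some b => if a ≠ b then false else equal_without matrix1 matrix2 (-1) (index + 1)
    | _, _ => true    -- IndexError caught by the try/except → True
termination_by ((if without = -1 then 0 else 1), ((matrix1.length : Int) - index).toNat)
decreasing_by
  · simp_all
    exact Prod.Lex.left _ _ (by omega)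
  · simp_all
    exact Prod.Lex.right _ (by omega)

-- ===== PORT B =====
-- B's loop: for i in range(index, min(len, len)): return False on first mismatch; else True.
-- `| _, _ => true` is unreachable inside Pre_ (there B's Python would raise IndexError, excluded by Pre_).
def eqPrefixLoop (m1 : List (List Int)) (m2 : List (List Int)) (index : Int) : Bool :=
  (PySem.List.pyRange index (min (m1.length : Int) (m2.length : Int))).all fun i =>
    PySem.List.pyGet? m1 i == PySem.List.pyGet? m2 i

def equal_without_alt (matrix1 : List (List Int)) (matrix2 : List (List Int)) (without : Int) (index : Int) : Bool :=
  match (if without ≠ -1 then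
           (PySem.List.pop? matrix1 without).bind fun r1 =>
             (PySem.List.pop? matrix2 without).map fun r2 => (r1.2, r2.2)
         else some (matrix1, matrix2)) with
  | none => false   -- IndexError from `del` (excluded by Pre_)
  | some (m1', m2') => eqPrefixLoop m1' m2' index

-- ===== PRECONDITION & SPEC =====
-- Pre_ excludes (a) inputs on which A raises IndexError at `del` (without ≠ -1 and out of range for
-- either matrix), and (b) indices below -min(post-deletion lengths), where A's value True is an
-- accident of its try/except swallowing the negative-index wraparound IndexError and B's own loop raises IndexError.
def Pre_equal_without (matrix1 : List (List Int)) (matrix2 : List (List Int)) (without : Int) (index : Int) : Prop :=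
  (without = -1 ∨
    (-(matrix1.length : Int) ≤ without ∧ without < (matrix1.length : Int) ∧
     -(matrix2.length : Int) ≤ without ∧ without < (matrix2.length : Int))) ∧
  -(min ((matrix1.length : Int) - (if without = -1 then 0 else 1))
        ((matrix2.length : Int) - (if without = -1 then 0 else 1))) ≤ index

instance (matrix1 : List (List Int)) (matrix2 : List (List Int)) (without : Int) (index : Int) : Decidable (Pre_equal_without matrix1 matrix2 without index) := by unfold Pre_equal_without; infer_instance

def pvWitness_equal_without : List (List Int) × List (List Int) × Int × Int := ([[1], [2]], [[1], [2]], 0, 0)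

def Spec_equal_without (matrix1 : List (List Int)) (matrix2 : List (List Int)) (without : Int) (index : Int) (out : Bool) : Prop := out = equal_without_alt matrix1 matrix2 without index
instance (matrix1 : List (List Int)) (matrix2 : List (List Int)) (without : Int) (index : Int) (out : Bool) : Decidable (Spec_equal_without matrix1 matrix2 without index out) := by unfold Spec_equal_without; infer_instance

-- ===== CLAIM (what is proved, stated in full; the proofs are below) =====
def Claim_equal_equal_without : Prop := ∀ (matrix1 : List (List Int)) (matrix2 : List (List Int)) (without : Int) (index : Int), Dom_equal_without matrix1 matrix2 without index → Pre_equal_without matrix1 matrix2 without index → Spec_equal_without matrix1 matrix2 without index (equal_without matrix1 matrix2 without index)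

-- ===== LEMMAS AND PROOFS =====

-- `del xs[i]` succeeds exactly on in-range i (positive or negative).
lemma pop?_isSome_of_range {α : Type} (xs : List α) (i : Int)
    (h1 : -(xs.length : Int) ≤ i) (h2 : i < (xs.length : Int)) :
    (PySem.List.pop? xs i).isSome := by
  unfold PySem.List.pop? PySem.List.pyIdx?
  split_ifs with h0
  · have hk : i.toNat < xs.length := by omega
    simp [List.getElem?_eq_getElem hk]
  · have hk : xs.length - (-i).toNat < xs.length := by omega
    simp [List.getElem?_eq_getElem hk]

-- A's recursion (after the deletion step) equals B's min-bounded prefix loop,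
-- for every start index ≥ -min(len m1, len m2).
lemma loop_eq (m1 m2 : List (List Int)) :
    ∀ (n : Nat) (i : Int), ((m1.length : Int) - i).toNat ≤ n →
      -(min (m1.length : Int) (m2.length : Int)) ≤ i →
      equal_without m1 m2 (-1) i = eqPrefixLoop m1 m2 i := by
  have base : ∀ (i : Int), (m1.length : Int) ≤ i →
      equal_without m1 m2 (-1) i = eqPrefixLoop m1 m2 i := by
    intro i hlen
    rw [equal_without.eq_def]
    simp only [ne_eq, not_true_eq_false, if_false, if_pos hlen]
    unfold eqPrefixLoop
    rw [PySem.List.pyRange_one_eq_nil (by omega)]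
    simp
  intro n
  induction n with
  | zero =>
    intro i hn hi
    exact base i (by omega)
  | succ n ih =>
    intro i hn hi
    by_cases hlen : (m1.length : Int) ≤ i
    · exact base i hlen
    · rw [not_le] at hlen
      obtain ⟨a, ha⟩ : ∃ a, PySem.List.pyGet? m1 i = some a := by
        cases h : PySem.List.pyGet? m1 i with
        | none =>
          rw [PySem.List.pyGet?_eq_none_iff] at h
          exact absurd ⟨by omega, hlen⟩ h
        | some a => exact ⟨a, rfl⟩
      by_cases h2 : i < (m2.length : Int)
      · obtain ⟨b, hb⟩ : ∃ b, PySem.List.pyGet? m2 i = some b := by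
          cases h : PySem.List.pyGet? m2 i with
          | none =>
            rw [PySem.List.pyGet?_eq_none_iff] at h
            exact absurd ⟨by omega, h2⟩ h
          | some b => exact ⟨b, rfl⟩
        have hcons : PySem.List.pyRange i (min (m1.length : Int) (m2.length : Int)) =
            i :: PySem.List.pyRange (i + 1) (min (m1.length : Int) (m2.length : Int)) :=
          PySem.List.pyRange_one_cons (by omega)
        rw [equal_without.eq_def]
        simp only [ne_eq, not_true_eq_false, if_false, if_neg (by omega : ¬ (m1.length : Int) ≤ i), ha, hb]
        by_cases hab : a = b
        · subst hab
          simp only [not_true_eq_false, if_false]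
          rw [ih (i + 1) (by omega) (by omega)]
          unfold eqPrefixLoop
          rw [hcons]
          simp [ha, hb]
        · simp only [hab, not_false_eq_true, if_true]
          unfold eqPrefixLoop
          rw [hcons]
          simp [ha, hb, hab]
      · rw [not_lt] at h2
        have hb : PySem.List.pyGet? m2 i = none := by
          rw [PySem.List.pyGet?_eq_none_iff]
          intro hr
          exact absurd hr.2 (by omega)
        rw [equal_without.eq_def]
        simp only [ne_eq, not_true_eq_false, if_false, if_neg (by omega : ¬ (m1.length : Int) ≤ i), ha, hb]
        unfold eqPrefixLoop
        rw [PySem.List.pyRange_one_eq_nil (by omega)]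
        simp

-- ===== VERDICT (by name: the statement is the Claim_ definition above) =====
theorem equal_without_spec : Claim_equal_equal_without := by
  intro m1 m2 w i _hdom hpre
  obtain ⟨hw, hidx⟩ := hpre
  unfold Spec_equal_without
  by_cases hne : w = -1
  · subst hne
    have hidx' : -(min ((m1.length : Int)) ((m2.length : Int))) ≤ i := by
      exact hidx
    rw [equal_without_alt]
    exact loop_eq m1 m2 ((m1.length : Int) - i).toNat i (le_refl _) hidx'
  · obtain ⟨hw1, hw2, hw3, hw4⟩ := hw.resolve_left hne
    obtain ⟨⟨v1, m1'⟩, hp1⟩ := Option.isSome_iff_exists.mp (pop?_isSome_of_range m1 w hw1 hw2)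
    obtain ⟨⟨v2, m2'⟩, hp2⟩ := Option.isSome_iff_exists.mp (pop?_isSome_of_range m2 w hw3 hw4)
    have hl1 : m1'.length + 1 = m1.length := PySem.List.length_of_pop?_eq_some m1 hp1
    have hl2 : m2'.length + 1 = m2.length := PySem.List.length_of_pop?_eq_some m2 hp2
    rw [equal_without.eq_def, equal_without_alt]
    simp only [ne_eq, hne, not_false_eq_true, if_true, hp1, hp2]
    apply loop_eq m1' m2' ((m1'.length : Int) - i).toNat i (le_refl _)
    simp only [if_neg hne] at hidx
    omega
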